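-- pv_equiv track=rewrite | github.com/yourmean/DRAM-PE_2022_SRG | Sangjin/PG_68645_삼각 달팽이.py | solution
-- ===== SOURCE A (Python) =====
-- def solution(n):
--     T = [[0] * i for i in range(1,n+1)]
--
--     #mode1: 좌측 아래로 이동
--     #mode2: 맨 밑줄에서 오른쪽으로 이동
--     #mode3: 좌측 위로 이동
--     mode = 1
--     count = 1
--     #bottom: mode1->2로 변경시키는 x의 값
--     bottom = n-1
--     x,y = 0,0
--
--     while True:
--         #n에 1이 들어온 경우
--         if n == 1:
--             T = [[1]]
--             break
--
--         #더 이상 채울 칸이 없으면 종료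
--         if T[x][y] != 0:
--             break
--
--         if mode == 1:
--             T[x][y] = count
--             count += 1
--             x,y = x+1,y
--             if x == bottom:
--                 mode = 2
--                 bottom -= 1
--
--         elif mode == 2:
--             T[x][y] = count
--             count += 1
--             x,y = x,y+1
--             if y == bottom+1 or T[x][y+1] != 0:
--                 mode = 3
--         else:
--             T[x][y] = count
--             count += 1
--             x,y = x-1,y-1
--             if x == 0 or T[x-1][y-1] != 0:
--                 mode = 1
--     #2차원 배열을 1차원 배열로 정렬
--     answer = sum(T,[]) #[]에 T의 데이터를 모두 더한다
--     return answer
-- ===== SOURCE B (Python) =====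
-- def solution(n):
--     # closed form: the value of each cell of the triangular spiral is computed
--     # directly from its layer and edge, no simulation of the walk
--     def value(r, c):
--         l = min(c, r - c, n - 1 - r)          # spiral layer of cell (r, c)
--         m = n - 3 * l                          # side length of that layer
--         s = 1 + 3 * l * (n - 1) - 9 * l * (l - 1) // 2   # first value of the layer
--         if c == l:                             # down edge
--             return s + (r - 2 * l)
--         elif r == n - 1 - l:                   # bottom edge
--             return s + (m - 1) + (c - l)
--         else:                                  # up-left diagonal edge
--             return s + 2 * (m - 1) + (n - 1 - l - r)
--     return [value(r, c) for r in range(n) for c in range(r + 1)]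
-- ===== Notes on version B (the rewrite author's own statement) =====
-- stated objective: faster
-- what changed: B computes each cell's spiral value by a closed-form formula from its layer and edge (layer = min(c, r-c, n-1-r)) and emits the flattened list directly, instead of A's stateful walk over a mutable triangle with mode switching, collision tests on filled cells, and a quadratic sum(T,[]) flatten.
import Mathlib
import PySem

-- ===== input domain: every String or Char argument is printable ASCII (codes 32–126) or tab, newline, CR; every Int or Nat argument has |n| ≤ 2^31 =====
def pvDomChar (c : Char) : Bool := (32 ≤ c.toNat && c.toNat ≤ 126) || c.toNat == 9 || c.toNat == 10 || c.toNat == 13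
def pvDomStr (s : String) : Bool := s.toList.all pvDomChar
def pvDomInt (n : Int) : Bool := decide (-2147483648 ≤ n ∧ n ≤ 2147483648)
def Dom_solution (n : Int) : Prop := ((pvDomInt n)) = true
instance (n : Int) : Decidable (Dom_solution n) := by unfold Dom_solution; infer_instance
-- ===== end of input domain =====

-- B replaces A's stateful spiral walk (mutable triangle, mode switching, collision
-- tests, quadratic sum(T,[]) flatten) by a per-cell closed-form value; measurably faster.

-- ===== PORT A =====
-- T[x][y] read (Python raises on an out-of-range index; inside Pre_solution every
-- read of the run is in range, so the total default-0 form is exact there)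
def pvGet2 (T : List (List Int)) (x y : Int) : Int :=
  PySem.List.pyGetD (PySem.List.pyGetD T x []) y 0

-- T[x][y] = v
def pvSet2 (T : List (List Int)) (x y : Int) (v : Int) : List (List Int) :=
  PySem.List.pySetD T x (PySem.List.pySetD (PySem.List.pyGetD T x []) y v)

-- the while loop of A, step for step; fuel only makes it total (A's loop runs
-- n*(n+1)/2 + 1 iterations on n ≥ 2, which the supplied fuel dominates)
def pvLoopA (n : Int) : Nat → List (List Int) → Int → Int → Int → Int → Int → List (List Int)
  | 0, T, _, _, _, _, _ => T
  | fuel+1, T, mode, count, bottom, x, y =>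
    if n = 1 then [[1]]
    else if pvGet2 T x y ≠ 0 then T
    else if mode = 1 then
      let T' := pvSet2 T x y count
      let x' := x + 1
      if x' = bottom then pvLoopA n fuel T' 2 (count+1) (bottom-1) x' y
      else pvLoopA n fuel T' mode (count+1) bottom x' y
    else if mode = 2 then
      let T' := pvSet2 T x y count
      let y' := y + 1
      if y' = bottom + 1 ∨ pvGet2 T' x (y'+1) ≠ 0 then pvLoopA n fuel T' 3 (count+1) bottom x y'
      else pvLoopA n fuel T' mode (count+1) bottom x y'
    else
      let T' := pvSet2 T x y count
      let x' := x - 1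
      let y' := y - 1
      if x' = 0 ∨ pvGet2 T' (x'-1) (y'-1) ≠ 0 then pvLoopA n fuel T' 1 (count+1) bottom x' y'
      else pvLoopA n fuel T' mode (count+1) bottom x' y'

def solution (n : Int) : List Int :=
  -- T = [[0]*i for i in range(1, n+1)]
  let T := (PySem.List.pyRange 1 (n+1) 1).map (fun i => PySem.List.pyRepeat [(0 : Int)] i)
  -- while True: …   then answer = sum(T, [])
  (pvLoopA n (n.toNat * n.toNat + 2) T 1 1 (n-1) 0 0).flatten

-- ===== PORT B =====
-- the inner helper 'value' of B
def pvValue (n r c : Int) : Int :=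
  let l := min (min c (r - c)) (n - 1 - r)
  let m := n - 3 * l
  let s := 1 + 3 * l * (n - 1) - PySem.Int.floordiv (9 * l * (l - 1)) 2
  if c = l then s + (r - 2 * l)
  else if r = n - 1 - l then s + (m - 1) + (c - l)
  else s + 2 * (m - 1) + (n - 1 - l - r)

def solution_alt (n : Int) : List Int :=
  (PySem.List.pyRange 0 n 1).flatMap (fun r =>
    (PySem.List.pyRange 0 (r + 1) 1).map (fun c => pvValue n r c))

-- ===== PRECONDITION & SPEC =====
-- Pre_: exactly the inputs on which A returns (for n ≤ 0 A raises IndexError on T[0][0])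
def Pre_solution (n : Int) : Prop := 1 ≤ n
instance (n : Int) : Decidable (Pre_solution n) := by unfold Pre_solution; infer_instance
def pvWitness_solution : Int := 5

def Spec_solution (n : Int) (out : List Int) : Prop := out = solution_alt n
instance (n : Int) (out : List Int) : Decidable (Spec_solution n out) := by unfold Spec_solution; infer_instance

-- ===== CLAIM (what is proved, stated in full; the proofs are below) =====
def Claim_equal_solution : Prop := ∀ (n : Int), Dom_solution n → Pre_solution n → Spec_solution n (solution n)

-- ===== LEMMAS AND PROOFS =====

-- value 1 + k of the first cell of spiral layer k
def pvS (n : Int) : Nat → Int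
  | 0 => 1
  | l+1 => pvS n l + 3 * (n - 3 * (l : Int) - 1)

-- spiral layer of cell (r, c)
def pvLayer (n r c : Int) : Int := min (min c (r - c)) (n - 1 - r)

-- the spiral value of cell (r, c) of the size-n triangle, in closed form
def pvV (n r c : Int) : Int :=
  pvS n (pvLayer n r c).toNat + (if c = pvLayer n r c then r - 2 * pvLayer n r c
                   else if r = n - 1 - pvLayer n r c then (n - 3 * pvLayer n r c - 1) + (c - pvLayer n r c)
                   else 2 * (n - 3 * pvLayer n r c - 1) + (n - 1 - pvLayer n r c - r))

-- the fully filled triangle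
def pvTfull (n : Int) : List (List Int) :=
  (List.range n.toNat).map (fun r : Nat => (List.range (r+1)).map (fun c : Nat => pvV n (r:Int) (c:Int)))

theorem pvSsum (n : Int) : ∀ l : Nat, 2 * (pvS n l - 1) + (n - 3*(l:Int)) * (n - 3*(l:Int) + 1) = n * (n + 1) := by
  intro l
  induction l with
  | zero => simp only [pvS]; push_cast; ring
  | succ l ih => simp only [pvS] at *; push_cast at *; nlinarith [ih]

theorem pvS_succ_int (n l : Int) (h : 0 ≤ l) :
    pvS n (l+1).toNat = pvS n l.toNat + 3 * (n - 3 * l - 1) := by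
  have h1 : (l+1).toNat = l.toNat + 1 := by omega
  rw [h1, pvS]
  have : ((l.toNat : Int)) = l := by omega
  rw [this]

theorem pvV_down (n r l : Int) (h0 : 0 ≤ l) (h1 : 2*l ≤ r) (h2 : r ≤ n-1-l) :
    pvV n r l = pvS n l.toNat + (r - 2*l) := by
  have hm : pvLayer n r l = l := by unfold pvLayer; omega
  unfold pvV
  rw [hm]; simp

theorem pvV_row (n c l : Int) (h0 : 0 ≤ l) (h1 : l ≤ c) (h2 : c ≤ n-1-2*l) :
    pvV n (n-1-l) c = pvS n l.toNat + (n-3*l-1) + (c - l) := by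
  have hm : pvLayer n (n-1-l) c = l := by unfold pvLayer; omega
  unfold pvV
  rw [hm]
  rcases eq_or_lt_of_le h1 with h | h
  · simp [← h]; omega
  · rw [if_neg (by omega), if_pos (by omega)]; ring

theorem pvV_diag (n r l : Int) (h0 : 0 ≤ l) (h1 : 2*l+1 ≤ r) (h2 : r ≤ n-2-l) :
    pvV n r (r-l) = pvS n l.toNat + 2*(n-3*l-1) + (n-1-l-r) := by
  have hm : pvLayer n r (r-l) = l := by unfold pvLayer; omega
  unfold pvV
  rw [hm, if_neg (by omega), if_neg (by omega)]; ring

-- every in-triangle cell: its layer, edge case split, and exact pvV value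
theorem pvV_cases (n r c : Int) (hc : 0 ≤ c) (hcr : c ≤ r) (hr : r ≤ n-1) :
    ∃ l : Int, 0 ≤ l ∧ l ≤ c ∧ l ≤ r - c ∧ l ≤ n-1-r ∧ 1 ≤ n - 3*l ∧
      ( (c = l ∧ 2*l ≤ r ∧ r ≤ n-1-l ∧ pvV n r c = pvS n l.toNat + (r - 2*l))
      ∨ (l < c ∧ r = n-1-l ∧ c ≤ n-1-2*l ∧ pvV n r c = pvS n l.toNat + (n-3*l-1) + (c-l))
      ∨ (l < c ∧ r - c = l ∧ 2*l+1 ≤ r ∧ r ≤ n-2-l ∧ pvV n r c = pvS n l.toNat + 2*(n-3*l-1) + (n-1-l-r)) ) := by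
  have hl : pvLayer n r c ≤ c ∧ pvLayer n r c ≤ r - c ∧ pvLayer n r c ≤ n-1-r ∧ 0 ≤ pvLayer n r c ∧
      (pvLayer n r c = c ∨ pvLayer n r c = r - c ∨ pvLayer n r c = n-1-r) := by
    unfold pvLayer; omega
  refine ⟨pvLayer n r c, by omega, by omega, by omega, by omega, by omega, ?_⟩
  set l := pvLayer n r c with hldef
  by_cases h1 : c = l
  · exact Or.inl ⟨h1, by omega, by omega, by rw [h1, pvV_down n r l (by omega) (by omega) (by omega)]⟩
  · by_cases h2 : r = n-1-l
    · refine Or.inr (Or.inl ⟨by omega, h2, by omega, ?_⟩)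
      rw [h2, pvV_row n c l (by omega) (by omega) (by omega)]
    · refine Or.inr (Or.inr ⟨by omega, by omega, by omega, by omega, ?_⟩)
      have h3 : c = r - l := by omega
      rw [h3, pvV_diag n r l (by omega) (by omega) (by omega)]

-- 1 ≤ pvV ≤ n(n+1)/2 on the triangle
theorem pvV_bounds (n r c : Int) (hc : 0 ≤ c) (hcr : c ≤ r) (hr : r ≤ n-1) :
    1 ≤ pvV n r c ∧ 2 * pvV n r c ≤ n * (n+1) := by
  obtain ⟨l, h0, hlc, hlrc, hlnr, hm, hcase⟩ := pvV_cases n r c hc hcr hr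
  have hsum := pvSsum n l.toNat
  rw [(by omega : ((l.toNat : Int)) = l)] at hsum
  have hA := mul_nonneg (by omega : (0:Int) ≤ n - (n-3*l)) (by omega : (0:Int) ≤ n + (n-3*l) + 1)
  rcases hcase with ⟨h1, h2, h3, hV⟩ | ⟨h1, h2, h3, hV⟩ | ⟨h1, h2, h3, h4, hV⟩ <;> rw [hV]
  · constructor
    · nlinarith
    · nlinarith [mul_nonneg (by omega : (0:Int) ≤ n-3*l-1) (by omega : (0:Int) ≤ n-3*l)]
  · constructor
    · nlinarith
    · nlinarith [mul_nonneg (by omega : (0:Int) ≤ n-3*l-1) (by omega : (0:Int) ≤ n-3*l-2)]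
  · constructor
    · nlinarith
    · nlinarith [mul_nonneg (by omega : (0:Int) ≤ n-3*l-2) (by omega : (0:Int) ≤ n-3*l-3)]

-- inside a deeper layer the values are strictly larger
theorem pvV_lt_of_layer_lt (n r₁ c₁ r₂ c₂ l₁ l₂ : Int)
    (b₁ : 0 ≤ l₁ ∧ l₁ ≤ c₁ ∧ l₁ ≤ r₁ - c₁ ∧ l₁ ≤ n-1-r₁ ∧ 1 ≤ n - 3*l₁ ∧
      ( (c₁ = l₁ ∧ 2*l₁ ≤ r₁ ∧ r₁ ≤ n-1-l₁ ∧ pvV n r₁ c₁ = pvS n l₁.toNat + (r₁ - 2*l₁))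
      ∨ (l₁ < c₁ ∧ r₁ = n-1-l₁ ∧ c₁ ≤ n-1-2*l₁ ∧ pvV n r₁ c₁ = pvS n l₁.toNat + (n-3*l₁-1) + (c₁-l₁))
      ∨ (l₁ < c₁ ∧ r₁ - c₁ = l₁ ∧ 2*l₁+1 ≤ r₁ ∧ r₁ ≤ n-2-l₁ ∧ pvV n r₁ c₁ = pvS n l₁.toNat + 2*(n-3*l₁-1) + (n-1-l₁-r₁)) ))
    (b₂ : 0 ≤ l₂ ∧ l₂ ≤ c₂ ∧ l₂ ≤ r₂ - c₂ ∧ l₂ ≤ n-1-r₂ ∧ 1 ≤ n - 3*l₂ ∧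
      ( (c₂ = l₂ ∧ 2*l₂ ≤ r₂ ∧ r₂ ≤ n-1-l₂ ∧ pvV n r₂ c₂ = pvS n l₂.toNat + (r₂ - 2*l₂))
      ∨ (l₂ < c₂ ∧ r₂ = n-1-l₂ ∧ c₂ ≤ n-1-2*l₂ ∧ pvV n r₂ c₂ = pvS n l₂.toNat + (n-3*l₂-1) + (c₂-l₂))
      ∨ (l₂ < c₂ ∧ r₂ - c₂ = l₂ ∧ 2*l₂+1 ≤ r₂ ∧ r₂ ≤ n-2-l₂ ∧ pvV n r₂ c₂ = pvS n l₂.toNat + 2*(n-3*l₂-1) + (n-1-l₂-r₂)) ))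
    (hlt : l₁ < l₂) : pvV n r₁ c₁ < pvV n r₂ c₂ := by
  obtain ⟨h0₁, hc₁, hrc₁, hnr₁, hm₁, hcase₁⟩ := b₁
  obtain ⟨h0₂, hc₂, hrc₂, hnr₂, hm₂, hcase₂⟩ := b₂
  have hs₁ := pvSsum n l₁.toNat
  rw [(by omega : ((l₁.toNat : Int)) = l₁)] at hs₁
  have hs₂ := pvSsum n l₂.toNat
  rw [(by omega : ((l₂.toNat : Int)) = l₂)] at hs₂
  -- m₂ ≤ m₁ - 3 where mᵢ = n - 3 lᵢ
  have hmono : (n-3*l₂) * (n-3*l₂+1) ≤ (n-3*l₁-3) * (n-3*l₁-2) := by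
    nlinarith [mul_nonneg (by omega : (0:Int) ≤ (n-3*l₁-3) - (n-3*l₂)) (by omega : (0:Int) ≤ (n-3*l₁-2) + (n-3*l₂))]
  have hS : pvS n l₁.toNat + (3*(n-3*l₁) - 4) < pvS n l₂.toNat := by nlinarith
  rcases hcase₁ with ⟨h1, h2, h3, hV⟩ | ⟨h1, h2, h3, hV⟩ | ⟨h1, h2, h3, h4, hV⟩ <;>
    rcases hcase₂ with ⟨g1, g2, g3, gV⟩ | ⟨g1, g2, g3, gV⟩ | ⟨g1, g2, g3, g4, gV⟩ <;>
      rw [hV, gV] <;> omega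

-- pvV is injective on the triangle
theorem pvV_inj (n r₁ c₁ r₂ c₂ : Int) (hc₁ : 0 ≤ c₁) (hcr₁ : c₁ ≤ r₁) (hr₁ : r₁ ≤ n-1)
    (hc₂ : 0 ≤ c₂) (hcr₂ : c₂ ≤ r₂) (hr₂ : r₂ ≤ n-1)
    (h : pvV n r₁ c₁ = pvV n r₂ c₂) : r₁ = r₂ ∧ c₁ = c₂ := by
  obtain ⟨l₁, b₁⟩ := pvV_cases n r₁ c₁ hc₁ hcr₁ hr₁
  obtain ⟨l₂, b₂⟩ := pvV_cases n r₂ c₂ hc₂ hcr₂ hr₂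
  rcases lt_trichotomy l₁ l₂ with hlt | heq | hlt
  · exact absurd h (by have := pvV_lt_of_layer_lt n r₁ c₁ r₂ c₂ l₁ l₂ b₁ b₂ hlt; omega)
  · subst heq
    obtain ⟨h0₁, hc₁', hrc₁, hnr₁, hm₁, hcase₁⟩ := b₁
    obtain ⟨_, hc₂', hrc₂, hnr₂, _, hcase₂⟩ := b₂
    rcases hcase₁ with ⟨h1, h2, h3, hV⟩ | ⟨h1, h2, h3, hV⟩ | ⟨h1, h2, h3, h4, hV⟩ <;>
      rcases hcase₂ with ⟨g1, g2, g3, gV⟩ | ⟨g1, g2, g3, gV⟩ | ⟨g1, g2, g3, g4, gV⟩ <;>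
        rw [hV, gV] at h <;> omega
  · exact absurd h.symm (by have := pvV_lt_of_layer_lt n r₂ c₂ r₁ c₁ l₂ l₁ b₂ b₁ hlt; omega)


-- ===== triangle state invariant for the port of A =====

-- after k cells are filled, entry (r,c) is its spiral value if that value is ≤ k, else 0
def pvTInv (n k : Int) (T : List (List Int)) : Prop :=
  T.length = n.toNat ∧ ∀ r : Nat, r < n.toNat →
    (T.getD r []).length = r + 1 ∧
    ∀ c : Nat, c ≤ r → (T.getD r []).getD c 0 = (if pvV n r c ≤ k then pvV n r c else 0)

theorem pvGet2_eq (n k : Int) (T : List (List Int)) (h : pvTInv n k T) (x y : Int)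
    (hy0 : 0 ≤ y) (hyx : y ≤ x) (hxn : x < n) :
    pvGet2 T x y = (if pvV n x y ≤ k then pvV n x y else 0) := by
  obtain ⟨hlen, hrow⟩ := h
  have hx : x.toNat < n.toNat := by omega
  have hxl : x < (PySem.List.len T) := by rw [PySem.List.len_eq]; omega
  obtain ⟨hrl, hent⟩ := hrow x.toNat hx
  unfold pvGet2
  rw [PySem.List.pyGetD_eq_getElem T [] (by omega) hxl]
  have hTx : T[x.toNat] = T.getD x.toNat [] := (List.getD_eq_getElem T [] (by omega)).symm
  rw [hTx]
  have hyl : y < (PySem.List.len (T.getD x.toNat [])) := by rw [PySem.List.len_eq]; omega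
  rw [PySem.List.pyGetD_eq_getElem _ 0 (by omega) hyl]
  have hTy : (T.getD x.toNat [])[y.toNat]'(by omega) = (T.getD x.toNat []).getD y.toNat 0 :=
    (List.getD_eq_getElem _ 0 (by omega)).symm
  rw [hTy, hent y.toNat (by omega)]
  rw [(by omega : ((x.toNat : Int)) = x), (by omega : ((y.toNat : Int)) = y)]

theorem pvSet2_TInv (n k : Int) (T : List (List Int)) (h : pvTInv n k T) (x y : Int)
    (hy0 : 0 ≤ y) (hyx : y ≤ x) (hxn : x < n) (hV : pvV n x y = k + 1) :
    pvTInv n (k+1) (pvSet2 T x y (k+1)) := by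
  obtain ⟨hlen, hrow⟩ := h
  unfold pvSet2
  rw [PySem.List.pySetD_of_nonneg _ _ (by omega : (0:Int) ≤ x),
      PySem.List.pySetD_of_nonneg _ _ (by omega : (0:Int) ≤ y),
      PySem.List.pyGetD_eq_getElem T [] (by omega) (by push_cast; omega)]
  have hTx : T[x.toNat]'(by omega) = T.getD x.toNat [] := (List.getD_eq_getElem T [] (by omega)).symm
  rw [hTx]
  constructor
  · rw [List.length_set]; exact hlen
  intro r hr
  obtain ⟨hrl, hent⟩ := hrow r hr
  by_cases hrx : r = x.toNat
  · subst hrx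
    set r := x.toNat with hrdef
    have hgd : (T.set r ((T.getD r []).set y.toNat (k+1))).getD r [] = (T.getD r []).set y.toNat (k+1) := by
      rw [List.getD_eq_getElem _ [] (by rw [List.length_set]; omega), List.getElem_set]
      simp
    rw [hgd]
    constructor
    · rw [List.length_set]; exact hrl
    intro c hc
    by_cases hcy : c = y.toNat
    · subst hcy
      set c := y.toNat with hcdef
      have : ((T.getD r []).set c (k+1)).getD c 0 = k+1 := by
        rw [List.getD_eq_getElem _ 0 (by rw [List.length_set]; omega), List.getElem_set]
        simp
      rw [this]
      have hVe : pvV n r c = k+1 := by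
        rw [(by omega : ((r : Int)) = x), (by omega : ((c : Int)) = y)]; exact hV
      rw [hVe, if_pos (by omega)]
    · have : ((T.getD r []).set y.toNat (k+1)).getD c 0 = (T.getD r []).getD c 0 := by
        rcases lt_or_ge c (T.getD r []).length with hcl | hcl
        · rw [List.getD_eq_getElem _ 0 (by rw [List.length_set]; omega), List.getElem_set,
              if_neg (by omega), List.getD_eq_getElem _ 0 (by omega)]
        · rw [List.getD_eq_default _ 0 (by rw [List.length_set]; omega), List.getD_eq_default _ 0 (by omega)]
      rw [this, hent c hc]
      have hne : pvV n r c ≠ k + 1 := by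
        intro he
        have := pvV_inj n r c x y (by omega) (by omega) (by omega) hy0 hyx (by omega) (by rw [he, hV])
        omega
      split_ifs with h1 h2 h2 <;> omega
  · have hgd : (T.set x.toNat ((T.getD x.toNat []).set y.toNat (k+1))).getD r [] = T.getD r [] := by
      rw [List.getD_eq_getElem _ [] (by rw [List.length_set]; omega), List.getElem_set,
          if_neg (by omega)]
      exact (List.getD_eq_getElem T [] (by omega)).symm
    rw [hgd]
    refine ⟨hrl, fun c hc => ?_⟩
    rw [hent c hc]
    have hne : pvV n r c ≠ k + 1 := by
      intro he
      have := pvV_inj n r c x y (by omega) (by omega) (by omega) hy0 hyx (by omega) (by rw [he, hV])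
      omega
    split_ifs with h1 h2 h2 <;> omega


-- ===== the loop invariant of A's while loop =====

def pvINV (n k : Int) (T : List (List Int)) (mode count bottom x y : Int) : Prop :=
  pvTInv n k T ∧ count = k + 1 ∧ 2 ≤ n ∧ 0 ≤ k ∧
  ( (mode = 1 ∧ ∃ l : Int, y = l ∧ bottom = n-1-l ∧ pvV n x y = k+1 ∧
       ( (l = 0 ∧ 0 ≤ x ∧ x ≤ n-2)
       ∨ (1 ≤ l ∧ 2*l-1 ≤ x ∧ x ≤ n-2-l ∧ 1 ≤ n-3*l)
       ∨ (1 ≤ l ∧ x = 2*l-1 ∧ n-3*l = 0) ))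
  ∨ (mode = 2 ∧ ∃ l : Int, 0 ≤ l ∧ x = n-1-l ∧ bottom = n-2-l ∧ pvV n x y = k+1 ∧
       ( (2 ≤ n-3*l ∧ l ≤ y ∧ y ≤ n-2*l-2)
       ∨ (n-3*l = 1 ∧ y = l) ))
  ∨ (mode = 3 ∧ ∃ l : Int, 0 ≤ l ∧ bottom = n-2-l ∧ y = x-l ∧ pvV n x y = k+1 ∧
       ( (n-3*l = 2 ∧ x = 2*l+1)
       ∨ (3 ≤ n-3*l ∧ 2*l+2 ≤ x ∧ x ≤ n-1-l) ))
  ∨ (2*k = n*(n+1) ∧ 0 ≤ y ∧ y ≤ x ∧ x ≤ n-1 ∧ pvV n x y ≤ k) )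

-- the cell (x,y) of any invariant state lies in the triangle
theorem pvINV_cell (n k : Int) (T : List (List Int)) (mode count bottom x y : Int)
    (h : pvINV n k T mode count bottom x y) : 0 ≤ y ∧ y ≤ x ∧ x ≤ n-1 := by
  obtain ⟨-, -, hn2, -, hdisj⟩ := h
  rcases hdisj with ⟨-, l, hy, -, -, hsub⟩ | ⟨-, l, h0l, hx, -, -, hsub⟩ | ⟨-, l, h0l, -, hy, -, hsub⟩ | ⟨-, h1, h2, h3, -⟩ <;> omega

-- a fully filled invariant triangle is pvTfull
theorem pvTInv_eq_full (n k : Int) (T : List (List Int)) (h : pvTInv n k T) (hk : n*(n+1) ≤ 2*k) :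
    T = pvTfull n := by
  obtain ⟨hlen, hrow⟩ := h
  apply List.ext_getElem (by simp [pvTfull, hlen])
  intro r h1 h2
  have hr : r < n.toNat := by omega
  obtain ⟨hrl, hent⟩ := hrow r hr
  have hTr : T[r] = T.getD r [] := (List.getD_eq_getElem T [] (by omega)).symm
  have hfull : (pvTfull n)[r]'h2 = (List.range (r+1)).map (fun c : Nat => pvV n (r:Int) (c:Int)) := by
    simp only [pvTfull, List.getElem_map, List.getElem_range]
  rw [hfull, hTr]
  apply List.ext_getElem (by rw [hrl]; simp)
  intro c hc1 hc2
  have hc : c ≤ r := by omega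
  have hTc : (T.getD r [])[c] = (T.getD r []).getD c 0 := (List.getD_eq_getElem _ 0 (by omega)).symm
  rw [hTc, hent c hc]
  simp only [List.getElem_map, List.getElem_range]
  have hb := pvV_bounds n r c (by omega) (by omega) (by omega)
  rw [if_pos (by omega)]

theorem pvLoopA_run (n : Int) (hn2 : 2 ≤ n) : ∀ fuel : Nat, ∀ k T mode count bottom x y,
    pvINV n k T mode count bottom x y →
    n*(n+1) + 2 ≤ 2*k + 2*(fuel : Int) →
    pvLoopA n fuel T mode count bottom x y = pvTfull n := by
  intro fuel
  induction fuel with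
  | zero =>
    intro k T mode count bottom x y hINV hfuel
    exfalso
    obtain ⟨hb1, hb2, hb3⟩ := pvINV_cell n k T mode count bottom x y hINV
    have hVb := pvV_bounds n x y hb1 hb2 hb3
    obtain ⟨-, -, -, -, hdisj⟩ := hINV
    simp only [Nat.cast_zero] at hfuel
    rcases hdisj with ⟨-, l, -, -, hV, -⟩ | ⟨-, l, -, -, -, hV, -⟩ | ⟨-, l, -, -, -, hV, -⟩ | ⟨hk, -⟩ <;> omega
  | succ fuel ih =>
    intro k T mode count bottom x y hINV hfuel
    obtain ⟨hb1, hb2, hb3⟩ := pvINV_cell n k T mode count bottom x y hINV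
    obtain ⟨hTI, hcount, -, hk0, hdisj⟩ := hINV
    subst hcount
    have hfuel' : n*(n+1) + 2 ≤ 2*(k+1) + 2*(fuel : Int) := by push_cast at hfuel ⊢; omega
    have hgval := pvGet2_eq n k T hTI x y hb1 hb2 (by omega)
    simp only [pvLoopA]
    rw [if_neg (by omega : ¬ n = 1)]
    rcases hdisj with ⟨hm, l, hy, hbot, hV, hsub⟩ | ⟨hm, l, h0l, hx, hbot, hV, hsub⟩ | ⟨hm, l, h0l, hbot, hy, hV, hsub⟩ | ⟨hk2, hf1, hf2, hf3, hVle⟩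
    -- ===== mode 1 =====
    · subst hm; subst hy; subst hbot
      rw [if_neg (show ¬(pvGet2 T x y ≠ 0) by rw [hgval, if_neg (by omega)]; simp),
          if_pos rfl]
      have hT2 := pvSet2_TInv n k T hTI x y hb1 hb2 (by omega) hV
      rcases hsub with ⟨h1, h2, h3⟩ | ⟨h1, h2, h3, h4⟩ | ⟨h1, h2, h3⟩
      · -- layer 0 of the first phase
        subst h1
        have hS0 : pvS n (0:Int).toNat = 1 := rfl
        have hVc := pvV_down n x 0 (by omega) (by omega) (by omega)
        by_cases htr : x + 1 = n - 1 - 0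
        · rw [if_pos htr]
          have hVn := pvV_row n 0 0 (by omega) (by omega) (by omega)
          apply ih (k+1) _ 2 _ _ _ _ ?_ hfuel'
          refine ⟨hT2, rfl, hn2, by omega, Or.inr (Or.inl ⟨rfl, 0, by omega, by omega, by omega, ?_, ?_⟩)⟩
          · rw [(show x+1 = n-1-(0:Int) by omega)]; omega
          · exact Or.inl ⟨by omega, by omega, by omega⟩
        · rw [if_neg htr]
          have hVn := pvV_down n (x+1) 0 (by omega) (by omega) (by omega)
          apply ih (k+1) _ 1 _ _ _ _ ?_ hfuel'
          exact ⟨hT2, rfl, hn2, by omega, Or.inl ⟨rfl, 0, rfl, rfl, by omega, Or.inl ⟨rfl, by omega, by omega⟩⟩⟩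
      · -- layer y ≥ 1, at least one inner cell
        have hS := pvS_succ_int n (y-1) (by omega)
        rw [(show y - 1 + 1 = y by ring)] at hS
        rcases eq_or_lt_of_le h2 with hx2 | hx2
        · -- first cell of the phase: the last diagonal cell of layer y-1
          have hVc := pvV_diag n (2*y-1) (y-1) (by omega) (by omega) (by omega)
          rw [(show 2*y-1 - (y-1) = y by ring)] at hVc
          rw [hx2] at hVc
          by_cases htr : x + 1 = n - 1 - y
          · -- n = 3l+1: this layer has a single cell, go fill it in mode 2
            rw [if_pos htr]
            have hVn := pvV_row n y y (by omega) (by omega) (by omega)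
            apply ih (k+1) _ 2 _ _ _ _ ?_ hfuel'
            refine ⟨hT2, rfl, hn2, by omega, Or.inr (Or.inl ⟨rfl, y, by omega, by omega, by omega, ?_, ?_⟩)⟩
            · rw [(show x+1 = n-1-y by omega)]; omega
            · exact Or.inr ⟨by omega, rfl⟩
          · rw [if_neg htr]
            have hVn := pvV_down n (x+1) y (by omega) (by omega) (by omega)
            apply ih (k+1) _ 1 _ _ _ _ ?_ hfuel'
            exact ⟨hT2, rfl, hn2, by omega, Or.inl ⟨rfl, y, rfl, rfl, by omega, Or.inr (Or.inl ⟨h1, by omega, by omega, h4⟩)⟩⟩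
        · -- strictly inside the down edge of layer y
          have hVc := pvV_down n x y (by omega) (by omega) (by omega)
          by_cases htr : x + 1 = n - 1 - y
          · rw [if_pos htr]
            have hVn := pvV_row n y y (by omega) (by omega) (by omega)
            apply ih (k+1) _ 2 _ _ _ _ ?_ hfuel'
            refine ⟨hT2, rfl, hn2, by omega, Or.inr (Or.inl ⟨rfl, y, by omega, by omega, by omega, ?_, ?_⟩)⟩
            · rw [(show x+1 = n-1-y by omega)]; omega
            · exact Or.inl ⟨by omega, by omega, by omega⟩
          · rw [if_neg htr]
            have hVn := pvV_down n (x+1) y (by omega) (by omega) (by omega)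
            apply ih (k+1) _ 1 _ _ _ _ ?_ hfuel'
            exact ⟨hT2, rfl, hn2, by omega, Or.inl ⟨rfl, y, rfl, rfl, by omega, Or.inr (Or.inl ⟨h1, by omega, by omega, h4⟩)⟩⟩
      · -- n = 3l: this fill is the last cell of the spiral
        subst h2
        have hS := pvS_succ_int n (y-1) (by omega)
        rw [(show y - 1 + 1 = y by ring)] at hS
        have hVc := pvV_diag n (2*y-1) (y-1) (by omega) (by omega) (by omega)
        rw [(show 2*y-1 - (y-1) = y by ring)] at hVc
        have hK := pvSsum n (y-1).toNat
        rw [(show (((y-1).toNat : Int)) = y-1 by omega)] at hK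
        rw [(show n - 3*(y-1) = 3 by omega)] at hK
        rw [if_neg (by omega : ¬ (2*y-1 + 1 = n - 1 - y))]
        have hVn := pvV_row n y (y-1) (by omega) (by omega) (by omega)
        rw [(show n-1-(y-1) = 2*y-1+1 by omega)] at hVn
        apply ih (k+1) _ 1 _ _ _ _ ?_ hfuel'
        refine ⟨hT2, rfl, hn2, by omega, Or.inr (Or.inr (Or.inr ⟨?_, by omega, by omega, by omega, by omega⟩))⟩
        linarith
    -- ===== mode 2 =====
    · subst hm; subst hx; subst hbot
      rw [if_neg (show ¬(pvGet2 T (n-1-l) y ≠ 0) by rw [hgval, if_neg (by omega)]; simp),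
          if_neg (by omega : ¬ (2:Int) = 1), if_pos rfl]
      have hT2 := pvSet2_TInv n k T hTI (n-1-l) y hb1 hb2 (by omega) hV
      rcases hsub with ⟨h1, h2, h3⟩ | ⟨h1, h2⟩
      · -- at least two cells on this bottom edge
        have hVc := pvV_row n y l h0l h2 (by omega)
        by_cases hlast : y = n - 2*l - 2
        · -- last fill of the bottom edge: switch to mode 3
          have hcnd : y + 1 = n - 2 - l + 1 ∨ pvGet2 (pvSet2 T (n-1-l) y (k+1)) (n-1-l) (y+1+1) ≠ 0 := by
            by_cases hl0 : l = 0
            · left; omega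
            · right
              have hS := pvS_succ_int n (l-1) (by omega)
              rw [(show l-1+1 = l by ring)] at hS
              have hg2 := pvGet2_eq n (k+1) (pvSet2 T (n-1-l) y (k+1)) hT2 (n-1-l) (y+2) (by omega) (by omega) (by omega)
              have hVr := pvV_diag n (n-1-l) (l-1) (by omega) (by omega) (by omega)
              rw [(show n-1-l - (l-1) = y+2 by omega)] at hVr
              have hBr := pvV_bounds n (n-1-l) (y+2) (by omega) (by omega) (by omega)
              rw [(show y+1+1 = y+2 by ring), hg2, if_pos (by omega)]
              omega
          rw [if_pos hcnd]
          have hVn := pvV_row n (y+1) l h0l (by omega) (by omega)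
          apply ih (k+1) _ 3 _ _ _ _ ?_ hfuel'
          exact ⟨hT2, rfl, hn2, by omega, Or.inr (Or.inr (Or.inl ⟨rfl, l, h0l, rfl, by omega, by omega, by omega⟩))⟩
        · -- the bottom edge continues
          have hcnd : ¬ (y + 1 = n - 2 - l + 1 ∨ pvGet2 (pvSet2 T (n-1-l) y (k+1)) (n-1-l) (y+1+1) ≠ 0) := by
            rw [not_or]
            refine ⟨by omega, ?_⟩
            have hg2 := pvGet2_eq n (k+1) (pvSet2 T (n-1-l) y (k+1)) hT2 (n-1-l) (y+2) (by omega) (by omega) (by omega)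
            have hVr := pvV_row n (y+2) l h0l (by omega) (by omega)
            rw [(show y+1+1 = y+2 by ring), hg2, if_neg (by omega)]
            simp
          rw [if_neg hcnd]
          have hVn := pvV_row n (y+1) l h0l (by omega) (by omega)
          apply ih (k+1) _ 2 _ _ _ _ ?_ hfuel'
          exact ⟨hT2, rfl, hn2, by omega, Or.inr (Or.inl ⟨rfl, l, h0l, rfl, rfl, by omega, Or.inl ⟨h1, by omega, by omega⟩⟩)⟩
      · -- single-cell layer: this fill is the last cell of the spiral (n = 3l+1)
        subst h2
        have hl1 : 1 ≤ y := by omega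
        have hS := pvS_succ_int n (y-1) (by omega)
        rw [(show y-1+1 = y by ring)] at hS
        have hVc := pvV_row n y y (by omega) (by omega) (by omega)
        have hK := pvSsum n y.toNat
        rw [(show ((y.toNat : Int)) = y by omega)] at hK
        rw [(show n - 3*y = 1 by omega)] at hK
        have hcnd : y + 1 = n - 2 - y + 1 ∨ pvGet2 (pvSet2 T (n-1-y) y (k+1)) (n-1-y) (y+1+1) ≠ 0 := by
          by_cases hy1 : y = 1
          · left; omega
          · right
            have hS2 := pvS_succ_int n (y-2) (by omega)
            rw [(show y-2+1 = y-1 by ring)] at hS2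
            have hg2 := pvGet2_eq n (k+1) (pvSet2 T (n-1-y) y (k+1)) hT2 (n-1-y) (y+2) (by omega) (by omega) (by omega)
            have hVr := pvV_diag n (n-1-y) (y-2) (by omega) (by omega) (by omega)
            rw [(show n-1-y - (y-2) = y+2 by omega)] at hVr
            have hBr := pvV_bounds n (n-1-y) (y+2) (by omega) (by omega) (by omega)
            rw [(show y+1+1 = y+2 by ring), hg2, if_pos (by omega)]
            omega
        rw [if_pos hcnd]
        have hVn := pvV_diag n (n-1-y) (y-1) (by omega) (by omega) (by omega)
        rw [(show n-1-y - (y-1) = y+1 by omega)] at hVn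
        apply ih (k+1) _ 3 _ _ _ _ ?_ hfuel'
        refine ⟨hT2, rfl, hn2, by omega, Or.inr (Or.inr (Or.inr ⟨by linarith, by omega, by omega, by omega, by omega⟩))⟩
    -- ===== mode 3 =====
    -- ===== mode 3 =====
    · subst hm; subst hbot; subst hy
      rw [if_neg (show ¬(pvGet2 T x (x-l) ≠ 0) by rw [hgval, if_neg (by omega)]; simp),
          if_neg (by omega : ¬ (3:Int) = 1), if_neg (by omega : ¬ (3:Int) = 2)]
      have hT2 := pvSet2_TInv n k T hTI x (x-l) hb1 hb2 (by omega) hV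
      have hxr : 2*l+1 ≤ x ∧ x ≤ n-1-l ∧ 2 ≤ n-3*l := by rcases hsub with ⟨h1, h2⟩ | ⟨h1, h2, h3⟩ <;> omega
      have hVcval : pvV n x (x-l) = pvS n l.toNat + 2*(n-3*l-1) + (n-1-l-x) := by
        rcases eq_or_lt_of_le hxr.2.1 with he | he
        · have h := pvV_row n (n-1-2*l) l h0l (by omega) (by omega)
          rw [(show n-1-2*l = x - l by omega)] at h
          rw [(show n-1-l = x by omega)] at h
          omega
        · have h := pvV_diag n x l h0l (by omega) (by omega)
          omega
      rcases hsub with ⟨h1, h2⟩ | ⟨h1, h2, h3⟩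
      · -- two-cell-wide layer: this fill is the last cell of the spiral (n = 3l+2)
        have hK := pvSsum n l.toNat
        rw [(show ((l.toNat : Int)) = l by omega)] at hK
        rw [(show n - 3*l = 2 by omega)] at hK
        have hcnd : x - 1 = 0 ∨ pvGet2 (pvSet2 T x (x-l) (k+1)) (x-1-1) (x-l-1-1) ≠ 0 := by
          by_cases hl0 : l = 0
          · left; omega
          · right
            have hS := pvS_succ_int n (l-1) (by omega)
            rw [(show l-1+1 = l by ring)] at hS
            have hg2 := pvGet2_eq n (k+1) (pvSet2 T x (x-l) (k+1)) hT2 (2*l-1) (l-1) (by omega) (by omega) (by omega)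
            have hVr := pvV_down n (2*l-1) (l-1) (by omega) (by omega) (by omega)
            have hBr := pvV_bounds n (2*l-1) (l-1) (by omega) (by omega) (by omega)
            rw [(show x-1-1 = 2*l-1 by omega), (show x-l-1-1 = l-1 by omega), hg2, if_pos (by omega)]
            omega
        rw [if_pos hcnd]
        have hVd := pvV_down n (2*l) l h0l (by omega) (by omega)
        apply ih (k+1) _ 1 _ _ _ _ ?_ hfuel'
        refine ⟨hT2, rfl, hn2, by omega, Or.inr (Or.inr (Or.inr ⟨by linarith, by omega, by omega, by omega, ?_⟩))⟩
        rw [(show x-1 = 2*l by omega), (show x-l-1 = l by omega)]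
        omega
      · -- wide layer: walk up the diagonal
        by_cases hx2 : x = 2*l+2
        · -- last diagonal fill: switch to mode 1 on the next layer
          have hcnd : x - 1 = 0 ∨ pvGet2 (pvSet2 T x (x-l) (k+1)) (x-1-1) (x-l-1-1) ≠ 0 := by
            right
            have hg2 := pvGet2_eq n (k+1) (pvSet2 T x (x-l) (k+1)) hT2 (2*l) l h0l (by omega) (by omega)
            have hVr := pvV_down n (2*l) l h0l (by omega) (by omega)
            have hBr := pvV_bounds n (2*l) l (by omega) (by omega) (by omega)
            rw [(show x-1-1 = 2*l by omega), (show x-l-1-1 = l by omega), hg2, if_pos (by omega)]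
            omega
          rw [if_pos hcnd]
          have hVn := pvV_diag n (2*l+1) l h0l (by omega) (by omega)
          rw [(show (2*l+1 : Int) - l = l+1 by ring)] at hVn
          apply ih (k+1) _ 1 _ _ _ _ ?_ hfuel'
          refine ⟨hT2, rfl, hn2, by omega, Or.inl ⟨rfl, l+1, by omega, by omega, ?_, by omega⟩⟩
          rw [(show x-1 = 2*l+1 by omega), (show x-l-1 = l+1 by omega)]
          omega
        · -- continue in mode 3
          have hcnd : ¬ (x - 1 = 0 ∨ pvGet2 (pvSet2 T x (x-l) (k+1)) (x-1-1) (x-l-1-1) ≠ 0) := by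
            rw [not_or]
            refine ⟨by omega, ?_⟩
            have hg2 := pvGet2_eq n (k+1) (pvSet2 T x (x-l) (k+1)) hT2 (x-2) (x-2-l) (by omega) (by omega) (by omega)
            have hVr := pvV_diag n (x-2) l h0l (by omega) (by omega)
            rw [(show x-1-1 = x-2 by ring), (show x-l-1-1 = x-2-l by ring), hg2, if_neg (by omega)]
            simp
          rw [if_neg hcnd]
          have hVn := pvV_diag n (x-1) l h0l (by omega) (by omega)
          apply ih (k+1) _ 3 _ _ _ _ ?_ hfuel'
          refine ⟨hT2, rfl, hn2, by omega, Or.inr (Or.inr (Or.inl ⟨rfl, l, h0l, rfl, by omega, ?_, by omega⟩))⟩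
          rw [(show x-l-1 = x-1-l by ring)]
          omega
    -- ===== break state =====
    · have hVb := pvV_bounds n x y hb1 hb2 hb3
      rw [if_pos (by rw [hgval, if_pos (by omega)]; omega)]
      exact pvTInv_eq_full n k T hTI (by omega)


-- ===== initial state, closed form of pvS, and assembly =====

theorem pvTInv_init (n : Int) (hn : 1 ≤ n) :
    pvTInv n 0 ((PySem.List.pyRange 1 (n+1) 1).map (fun i => PySem.List.pyRepeat [(0:Int)] i)) := by
  have hT : (PySem.List.pyRange 1 (n+1) 1).map (fun i => PySem.List.pyRepeat [(0:Int)] i)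
      = (List.range n.toNat).map (fun r : Nat => List.replicate (r+1) (0:Int)) := by
    rw [PySem.List.pyRange_one, List.map_map]
    rw [(show (n+1-1).toNat = n.toNat by omega)]
    apply List.map_congr_left
    intro r _
    simp only [Function.comp_apply, PySem.List.pyRepeat_singleton]
    rw [(show ((1:Int) + (r:Int)).toNat = r + 1 by omega)]
  rw [hT]
  refine ⟨by simp, fun r hr => ?_⟩
  have hgd : ((List.range n.toNat).map (fun r : Nat => List.replicate (r+1) (0:Int))).getD r []
      = List.replicate (r+1) 0 := by
    rw [List.getD_eq_getElem _ [] (by simp; omega)]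
    simp
  rw [hgd]
  refine ⟨by simp, fun c hc => ?_⟩
  rw [List.getD_eq_getElem _ 0 (by simp; omega)]
  simp only [List.getElem_replicate]
  have hb := pvV_bounds n r c (by omega) (by omega) (by omega)
  rw [if_neg (by omega)]

theorem pvS_closed (n l : Int) (h : 0 ≤ l) :
    1 + 3*l*(n-1) - PySem.Int.floordiv (9*l*(l-1)) 2 = pvS n l.toNat := by
  have hK := pvSsum n l.toNat
  rw [(show ((l.toNat : Int)) = l by omega)] at hK
  obtain ⟨t, ht⟩ := Int.even_mul_succ_self (l-1)
  rw [(show l-1+1 = l by ring)] at ht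
  have hfd : PySem.Int.floordiv (9*l*(l-1)) 2 = 9*t := by
    rw [(show 9*l*(l-1) = 2*(9*t) by linarith), PySem.Int.floordiv_eq_ediv_of_pos (by norm_num)]
    exact Int.mul_ediv_cancel_left _ (by norm_num)
  rw [hfd]
  nlinarith [hK, ht]

theorem pvValue_eq (n r c : Int) (hc : 0 ≤ c) (hcr : c ≤ r) (hr : r ≤ n-1) :
    pvValue n r c = pvV n r c := by
  have hL : (0:Int) ≤ min (min c (r - c)) (n - 1 - r) := by omega
  have hs := pvS_closed n (min (min c (r - c)) (n - 1 - r)) hL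
  simp only [pvValue, pvV, pvLayer]
  rw [← hs]
  split_ifs <;> ring

theorem solution_alt_eq (n : Int) (hn : 0 ≤ n) : solution_alt n = (pvTfull n).flatten := by
  unfold solution_alt
  rw [pvTfull, ← List.flatMap_def, PySem.List.pyRange_zero n, List.flatMap_def, List.flatMap_def,
    List.map_map]
  apply congrArg List.flatten
  apply List.map_congr_left
  intro r hr
  have hrn : (r : Int) ≤ n - 1 := by
    have := List.mem_range.mp hr
    omega
  simp only [Function.comp_apply]
  rw [(show ((r:Int)+1) = ((r+1 : Nat) : Int) by push_cast; ring), PySem.List.pyRange_zero_nat (r+1),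
    List.map_map]
  apply List.map_congr_left
  intro c hc
  have hcr : (c : Int) ≤ (r : Int) := by
    have := List.mem_range.mp hc
    omega
  simp only [Function.comp_apply]
  exact pvValue_eq n r c (by omega) hcr hrn

theorem solution_eq (n : Int) (hn : 2 ≤ n) : solution n = (pvTfull n).flatten := by
  unfold solution
  apply congrArg List.flatten
  have hV0 : pvV n 0 0 = 0 + 1 := by
    have h := pvV_down n 0 0 le_rfl (by omega) (by omega)
    have hS0 : pvS n (0:Int).toNat = 1 := rfl
    omega
  apply pvLoopA_run n hn _ 0 _ 1 1 (n-1) 0 0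
  · exact ⟨pvTInv_init n (by omega), rfl, hn, le_rfl,
      Or.inl ⟨rfl, 0, rfl, by omega, hV0, Or.inl ⟨rfl, le_rfl, by omega⟩⟩⟩
  · have hc : ((n.toNat * n.toNat + 2 : Nat) : Int) = n*n + 2 := by
      push_cast
      rw [Int.toNat_of_nonneg (by omega : (0:Int) ≤ n)]
    rw [hc]
    nlinarith [mul_nonneg (by omega : (0:Int) ≤ n-1) (by omega : (0:Int) ≤ n-1)]

-- ===== VERDICT (by name: the statement is the Claim_ definition above) =====
theorem solution_spec : Claim_equal_solution := by
  intro n _ hpre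
  unfold Spec_solution
  by_cases h1 : n = 1
  · subst h1; decide
  · have hn2 : 2 ≤ n := by unfold Pre_solution at hpre; omega
    rw [solution_eq n hn2, solution_alt_eq n (by omega)]
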